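-- pv_equiv track=rewrite | github.com/celpegor216/ps | 프로그래머스/lv2/17683. ［3차］ 방금그곡/［3차］ 방금그곡.py | solution
-- ===== SOURCE A (Python) =====
-- dic = {'C#': 'H', 'D#': 'I', 'F#': 'J', 'G#': 'K', 'A#': 'L'}
--
-- def change(str):
--     for key in dic.keys():
--         str = str.replace(key, dic[key])
--     return str
--
-- def solution(m, musicinfos):
--     answer = '(None)'
--     answer_time = -1
--
--     m = change(m)
--
--     for info in musicinfos:
--         start, end, title, melody = info.split(',')
--         melody = change(melody)
--         length = len(melody)
--
--         if start == end:
--             continue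
--
--         if end == '00:00':
--             end = '24:00'
--
--         time = int(end[-2:]) - int(start[-2:]) + (int(end[:2]) - int(start[:2])) * 60
--
--         melody = melody * (time // length) + melody[:(time % length)]
--
--         if m in melody and time > answer_time:
--             answer = title
--             answer_time = time
--
--     return answer
-- ===== SOURCE B (Python) =====
-- # B: single-pass note scanner (instead of five sequential str.replace passes),
-- # played string built by modular indexing (instead of repetition+slice),
-- # explicit sliding-window scan (instead of `in`), and candidate list + max
-- # (instead of a running best accumulator).
--
-- NOTE_CODE = {'C': 'H', 'D': 'I', 'F': 'J', 'G': 'K', 'A': 'L'}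
--
-- def encode(s):
--     out = []
--     i = 0
--     while i < len(s):
--         c = s[i]
--         if c in NOTE_CODE and i + 1 < len(s) and s[i + 1] == '#':
--             out.append(NOTE_CODE[c])
--             i += 2
--         else:
--             out.append(c)
--             i += 1
--     return ''.join(out)
--
-- def occurs(needle, hay):
--     return any(hay[i:i + len(needle)] == needle
--                for i in range(len(hay) - len(needle) + 1))
--
-- def solution(m, musicinfos):
--     target = encode(m)
--     candidates = []
--     for info in musicinfos:
--         start, end, title, melody = info.split(',')
--         if start == end:
--             continue
--         if end == '00:00':
--             end = '24:00'
--         time = int(end[-2:]) - int(start[-2:]) + (int(end[:2]) - int(start[:2])) * 60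
--         notes = encode(melody)
--         if time >= 0:
--             played = ''.join(notes[i % len(notes)] for i in range(time))
--             if occurs(target, played):
--                 candidates.append((time, title))
--     if not candidates:
--         return '(None)'
--     return max(candidates, key=lambda c: c[0])[1]
-- ===== Notes on version B (the rewrite author's own statement) =====
-- stated objective: alternative
-- what changed: B replaces the five sequential str.replace passes by one left-to-right note scanner, builds the played string by modular indexing over range(time) instead of string repetition plus a slice, finds the tune with an explicit sliding-window slice comparison instead of `in`, and picks the winner as max over a collected candidate list instead of a running best/answer_time accumulator.
import Mathlib
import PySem

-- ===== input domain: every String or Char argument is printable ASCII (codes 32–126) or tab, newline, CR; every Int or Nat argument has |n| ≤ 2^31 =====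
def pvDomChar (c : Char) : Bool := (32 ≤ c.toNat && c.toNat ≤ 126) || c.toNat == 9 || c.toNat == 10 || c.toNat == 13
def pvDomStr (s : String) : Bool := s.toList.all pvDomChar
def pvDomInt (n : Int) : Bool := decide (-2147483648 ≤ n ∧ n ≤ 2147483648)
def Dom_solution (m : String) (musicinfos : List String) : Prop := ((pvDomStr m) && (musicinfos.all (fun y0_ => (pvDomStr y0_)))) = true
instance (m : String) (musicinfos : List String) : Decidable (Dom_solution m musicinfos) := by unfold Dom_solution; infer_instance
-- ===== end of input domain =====

-- B restructures A (note scanner instead of five replace passes, modular indexing instead of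
-- repetition+slice, explicit window scan instead of `in`, candidates+max instead of a running best);
-- same cost, no speed claim.

-- ===== PORT A =====
-- shared transliterations of the identical Python lines in A and B:
-- info.split(','), the end=='00:00'->'24:00' fixup, and the time arithmetic
def pvParts (info : String) : List String := (PySem.Str.split? info ",").getD []   -- sep "," ≠ "" so split? is always some

def pvEnd (endt : String) : String := if endt == "00:00" then "24:00" else endt

-- int(end[-2:]) - int(start[-2:]) + (int(end[:2]) - int(start[:2])) * 60   (.getD 0 is only reached outside Pre_)
def pvTime (start endt : String) : Int :=
  (PySem.Int.ofStr? (PySem.Str.slice endt (some (-2)) none)).getD 0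
  - (PySem.Int.ofStr? (PySem.Str.slice start (some (-2)) none)).getD 0
  + ((PySem.Int.ofStr? (PySem.Str.slice endt none (some 2))).getD 0
     - (PySem.Int.ofStr? (PySem.Str.slice start none (some 2))).getD 0) * 60

-- dic is only ever iterated in insertion order ('for key in dic.keys(): … dic[key]'): ported as its items list.
def dicA : List (String × String) := [("C#","H"),("D#","I"),("F#","J"),("G#","K"),("A#","L")]

def change (s : String) : String := dicA.foldl (fun s kv => PySem.Str.replace s kv.1 kv.2) s

-- melody * (time // length) + melody[:(time % length)]  (string concat/repeat done on the char list, exact)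
def repSliceA (melody : String) (time : Int) : String :=
  String.ofList (PySem.List.pyRepeat melody.toList (PySem.Int.floordiv time (PySem.Str.len melody))
    ++ (PySem.Str.slice melody none (some (PySem.Int.mod time (PySem.Str.len melody)))).toList)

-- one iteration of A's 'for info in musicinfos' loop, accumulator (answer, answer_time)
def stepA (m : String) (acc : String × Int) (info : String) : String × Int :=
  let parts := pvParts info
  if parts.length = 4 then
    let start := parts.getD 0 ""
    let endt0 := parts.getD 1 ""
    let title := parts.getD 2 ""
    let melody := change (parts.getD 3 "")
    if start == endt0 then acc
    else
      let time := pvTime start (pvEnd endt0)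
      if PySem.Str.isIn m (repSliceA melody time) && decide (acc.2 < time) then (title, time) else acc
  else acc  -- unpacking ≠ 4 parts raises ValueError: outside Pre_; int()/÷0 failures use .getD 0, also outside Pre_

def solution (m : String) (musicinfos : List String) : String :=
  (musicinfos.foldl (stepA (change m)) ("(None)", -1)).1

-- ===== PORT B =====
def noteCode : List (Char × Char) := [('C','H'),('D','I'),('F','J'),('G','K'),('A','L')]

def codeOf? (c : Char) : Option Char := noteCode.lookup c

-- B's while-loop scanner over the characters (index i becomes the structural position)
def encB : List Char → List Char
  | [] => []
  | [c] => [c]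
  | c :: d :: t =>
    if (codeOf? c).isSome ∧ d = '#' then (codeOf? c).getD c :: encB t
    else c :: encB (d :: t)

def encodeB (s : String) : String := String.ofList (encB s.toList)

-- ''.join(notes[i % len(notes)] for i in range(time))
def playedB (notes : List Char) (time : Int) : List Char :=
  (PySem.List.pyRange 0 time 1).map
    (fun i => (PySem.List.pyGet? notes (PySem.Int.mod i (notes.length : Int))).getD ' ')

-- any(hay[i:i+len(needle)] == needle for i in range(len(hay) - len(needle) + 1))
def occursB (needle hay : List Char) : Bool :=
  (PySem.List.pyRange 0 ((hay.length : Int) - (needle.length : Int) + 1) 1).any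
    (fun i => PySem.List.slice hay (some i) (some (i + (needle.length : Int))) == needle)

def stepB (target : String) (acc : List (Int × String)) (info : String) : List (Int × String) :=
  let parts := pvParts info
  if parts.length = 4 then
    let start := parts.getD 0 ""
    let endt0 := parts.getD 1 ""
    let title := parts.getD 2 ""
    let melody := parts.getD 3 ""
    if start == endt0 then acc
    else
      let time := pvTime start (pvEnd endt0)
      if 0 ≤ time ∧ occursB target.toList (playedB (encodeB melody).toList time) then acc ++ [(time, title)]
      else acc
  else acc

def solution_alt (m : String) (musicinfos : List String) : String :=
  let target := encodeB m
  let cands := musicinfos.foldl (stepB target) []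
  match PySem.List.max? cands (fun c => c.1) with
  | none => "(None)"
  | some c => c.2

-- ===== PRECONDITION & SPEC =====
-- Pre_ excludes exactly the inputs where A raises: an info that does not split into exactly 4
-- comma-separated fields (ValueError on unpacking), a played entry whose time fields do not parse
-- as int (ValueError), or one with an empty melody (ZeroDivisionError on time % len(melody)).
def Pre_solution (m : String) (musicinfos : List String) : Prop :=
  ∀ info ∈ musicinfos,
    (pvParts info).length = 4 ∧
    ((pvParts info).getD 0 "" = (pvParts info).getD 1 "" ∨
      ((PySem.Int.ofStr? (PySem.Str.slice (pvEnd ((pvParts info).getD 1 "")) (some (-2)) none)).isSome ∧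
       (PySem.Int.ofStr? (PySem.Str.slice (pvEnd ((pvParts info).getD 1 "")) none (some 2))).isSome ∧
       (PySem.Int.ofStr? (PySem.Str.slice ((pvParts info).getD 0 "") (some (-2)) none)).isSome ∧
       (PySem.Int.ofStr? (PySem.Str.slice ((pvParts info).getD 0 "") none (some 2))).isSome ∧
       (pvParts info).getD 3 "" ≠ ""))

instance (m : String) (musicinfos : List String) : Decidable (Pre_solution m musicinfos) := by
  unfold Pre_solution; infer_instance

def pvWitness_solution : String × List String :=
  ("C#DE", ["12:00,12:14,HELLO,C#DEFGAB", "13:00,13:05,WORLD,ABC"])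

def Spec_solution (m : String) (musicinfos : List String) (out : String) : Prop := out = solution_alt m musicinfos
instance (m : String) (musicinfos : List String) (out : String) : Decidable (Spec_solution m musicinfos out) := by unfold Spec_solution; infer_instance

-- ===== CLAIM (what is proved, stated in full; the proofs are below) =====
def Claim_equal_solution : Prop := ∀ (m : String) (musicinfos : List String), Dom_solution m musicinfos → Pre_solution m musicinfos → Spec_solution m musicinfos (solution m musicinfos)

-- ===== LEMMAS AND PROOFS =====

-- ---- E1: the five replace passes equal the single scanner ----

-- structural spec of s.replace(o1o2, n1) for a two-character pattern
def rep2 (o1 o2 n : Char) : List Char → List Char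
  | [] => []
  | [c] => [c]
  | c :: d :: t =>
    if c = o1 ∧ d = o2 then n :: rep2 o1 o2 n t
    else c :: rep2 o1 o2 n (d :: t)

lemma rep2_go (o1 o2 n : Char) :
    ∀ (fuel : Nat) (s acc : List Char), s.length ≤ fuel →
      PySem.Chars.replace.go [o1, o2] [n] fuel s acc = acc.reverse ++ rep2 o1 o2 n s := by
  intro fuel
  induction fuel with
  | zero =>
    intro s acc h
    have : s = [] := by cases s <;> simp_all
    subst this
    rw [PySem.Chars.replace.go]
    simp [rep2]
  | succ fuel ih =>
    intro s acc h
    match s with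
    | [] => rw [PySem.Chars.replace.go]; simp [rep2]; omega
    | [c] =>
      rw [PySem.Chars.replace.go]
      have hpre : [o1, o2].isPrefixOf [c] = false := by
        simp [List.isPrefixOf]
      simp only [hpre, Bool.false_eq_true, if_neg]
      rw [ih [] (c :: acc) (by simp)]
      simp [rep2]
    | c :: d :: t =>
      rw [PySem.Chars.replace.go]
      by_cases hc : c = o1 ∧ d = o2
      · have hpre : [o1, o2].isPrefixOf (c :: d :: t) = true := by
          simp [List.isPrefixOf, hc.1, hc.2]
        simp only [hpre, if_pos]
        rw [show List.drop [o1, o2].length (c :: d :: t) = t by simp]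
        rw [ih t ([n].reverse ++ acc) (by simp at h ⊢; omega)]
        simp [rep2, hc]
      · have hpre : [o1, o2].isPrefixOf (c :: d :: t) = false := by
          rcases not_and_or.mp hc with h1 | h1 <;> simp [List.isPrefixOf] <;> tauto
        simp only [hpre, Bool.false_eq_true, if_neg]
        rw [ih (d :: t) (c :: acc) (by simp at h ⊢; omega)]
        simp [rep2, hc]

lemma replace_eq_rep2 (o1 o2 n : Char) (s : List Char) :
    PySem.Chars.replace s [o1, o2] [n] = rep2 o1 o2 n s := by
  rw [PySem.Chars.replace]
  simp only [List.isEmpty_cons, if_neg]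
  rw [rep2_go o1 o2 n s.length s [] le_rfl]
  simp

lemma rep2_cons_of (o1 o2 n c : Char) (l : List Char) (h : c ≠ o1 ∨ l.headD ' ' ≠ o2) :
    rep2 o1 o2 n (c :: l) = c :: rep2 o1 o2 n l := by
  match l with
  | [] => simp [rep2]
  | d :: t =>
    have : ¬ (c = o1 ∧ d = o2) := by simp at h; tauto
    simp [rep2, this]

lemma rep2_head (o1 o2 n x : Char) (l : List Char) :
    ∃ l', (rep2 o1 o2 n (x :: l) = x :: l' ∨ rep2 o1 o2 n (x :: l) = n :: l') := by
  match l with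
  | [] => exact ⟨[], Or.inl (by simp [rep2])⟩
  | d :: t =>
    by_cases hc : x = o1 ∧ d = o2
    · exact ⟨rep2 o1 o2 n t, Or.inr (by simp [rep2, hc])⟩
    · exact ⟨rep2 o1 o2 n (d :: t), Or.inl (by simp [rep2, hc])⟩

def chainRep (s : List Char) : List Char :=
  rep2 'A' '#' 'L' (rep2 'G' '#' 'K' (rep2 'F' '#' 'J' (rep2 'D' '#' 'I' (rep2 'C' '#' 'H' s))))

lemma rep2_head_ne (o1 o2 n : Char) (hn : n ≠ '#') (y : Char) (t : List Char) (hy : y ≠ '#') :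
    ∃ y' t', rep2 o1 o2 n (y :: t) = y' :: t' ∧ y' ≠ '#' := by
  obtain ⟨l', h | h⟩ := rep2_head o1 o2 n y t
  exacts [⟨y, l', h, hy⟩, ⟨n, l', h, hn⟩]

lemma rep2_match (o1 o2 n : Char) (X : List Char) :
    rep2 o1 o2 n (o1 :: o2 :: X) = n :: rep2 o1 o2 n X := by
  simp [rep2]

lemma chainRep_eq_encB (s : List Char) : chainRep s = encB s := by
  have H : ∀ (n : Nat) (s : List Char), s.length ≤ n → chainRep s = encB s := by
    intro n
    induction n with
    | zero =>
      intro s h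
      have : s = [] := by cases s <;> simp_all
      subst this; simp [chainRep, rep2, encB]
    | succ n ih =>
      intro s h
      match s with
      | [] => simp [chainRep, rep2, encB]
      | [c] => simp [chainRep, rep2, encB]
      | c :: d :: t =>
        simp only [List.length_cons] at h
        have ht : t.length ≤ n := by omega
        have ht1 : ('#' :: t).length ≤ n := by simp; omega
        have htd : (d :: t).length ≤ n := by simp; omega
        simp only [chainRep]
        by_cases hd : d = '#'
        · subst hd
          by_cases h1 : c = 'C'
          · subst h1
            rw [rep2_match 'C' '#' 'H' t]
            rw [rep2_cons_of 'D' '#' 'I' 'H' _ (Or.inl (by decide))]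
            rw [rep2_cons_of 'F' '#' 'J' 'H' _ (Or.inl (by decide))]
            rw [rep2_cons_of 'G' '#' 'K' 'H' _ (Or.inl (by decide))]
            rw [rep2_cons_of 'A' '#' 'L' 'H' _ (Or.inl (by decide))]
            have := ih t ht; simp only [chainRep] at this; rw [this]
            simp [encB, codeOf?, noteCode]; try decide
          · by_cases h2 : c = 'D'
            · subst h2
              rw [rep2_cons_of 'C' '#' 'H' 'D' _ (Or.inl (by decide))]
              rw [rep2_cons_of 'C' '#' 'H' '#' _ (Or.inl (by decide))]
              rw [rep2_match 'D' '#' 'I' _]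
              rw [rep2_cons_of 'F' '#' 'J' 'I' _ (Or.inl (by decide))]
              rw [rep2_cons_of 'G' '#' 'K' 'I' _ (Or.inl (by decide))]
              rw [rep2_cons_of 'A' '#' 'L' 'I' _ (Or.inl (by decide))]
              have := ih t ht; simp only [chainRep] at this; rw [this]
              simp [encB, codeOf?, noteCode]; try decide
            · by_cases h3 : c = 'F'
              · subst h3
                rw [rep2_cons_of 'C' '#' 'H' 'F' _ (Or.inl (by decide))]
                rw [rep2_cons_of 'C' '#' 'H' '#' _ (Or.inl (by decide))]
                rw [rep2_cons_of 'D' '#' 'I' 'F' _ (Or.inl (by decide))]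
                rw [rep2_cons_of 'D' '#' 'I' '#' _ (Or.inl (by decide))]
                rw [rep2_match 'F' '#' 'J' _]
                rw [rep2_cons_of 'G' '#' 'K' 'J' _ (Or.inl (by decide))]
                rw [rep2_cons_of 'A' '#' 'L' 'J' _ (Or.inl (by decide))]
                have := ih t ht; simp only [chainRep] at this; rw [this]
                simp [encB, codeOf?, noteCode]; try decide
              · by_cases h4 : c = 'G'
                · subst h4
                  rw [rep2_cons_of 'C' '#' 'H' 'G' _ (Or.inl (by decide))]
                  rw [rep2_cons_of 'C' '#' 'H' '#' _ (Or.inl (by decide))]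
                  rw [rep2_cons_of 'D' '#' 'I' 'G' _ (Or.inl (by decide))]
                  rw [rep2_cons_of 'D' '#' 'I' '#' _ (Or.inl (by decide))]
                  rw [rep2_cons_of 'F' '#' 'J' 'G' _ (Or.inl (by decide))]
                  rw [rep2_cons_of 'F' '#' 'J' '#' _ (Or.inl (by decide))]
                  rw [rep2_match 'G' '#' 'K' _]
                  rw [rep2_cons_of 'A' '#' 'L' 'K' _ (Or.inl (by decide))]
                  have := ih t ht; simp only [chainRep] at this; rw [this]
                  simp [encB, codeOf?, noteCode]; try decide
                · by_cases h5 : c = 'A'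
                  · subst h5
                    rw [rep2_cons_of 'C' '#' 'H' 'A' _ (Or.inl (by decide))]
                    rw [rep2_cons_of 'C' '#' 'H' '#' _ (Or.inl (by decide))]
                    rw [rep2_cons_of 'D' '#' 'I' 'A' _ (Or.inl (by decide))]
                    rw [rep2_cons_of 'D' '#' 'I' '#' _ (Or.inl (by decide))]
                    rw [rep2_cons_of 'F' '#' 'J' 'A' _ (Or.inl (by decide))]
                    rw [rep2_cons_of 'F' '#' 'J' '#' _ (Or.inl (by decide))]
                    rw [rep2_cons_of 'G' '#' 'K' 'A' _ (Or.inl (by decide))]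
                    rw [rep2_cons_of 'G' '#' 'K' '#' _ (Or.inl (by decide))]
                    rw [rep2_match 'A' '#' 'L' _]
                    have := ih t ht; simp only [chainRep] at this; rw [this]
                    simp [encB, codeOf?, noteCode]; try decide
                  · -- c is not a sharpable note: every pass keeps c in front
                    rw [rep2_cons_of 'C' '#' 'H' c _ (Or.inl h1)]
                    rw [rep2_cons_of 'D' '#' 'I' c _ (Or.inl h2)]
                    rw [rep2_cons_of 'F' '#' 'J' c _ (Or.inl h3)]
                    rw [rep2_cons_of 'G' '#' 'K' c _ (Or.inl h4)]
                    rw [rep2_cons_of 'A' '#' 'L' c _ (Or.inl h5)]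
                    have := ih ('#' :: t) ht1; simp only [chainRep] at this; rw [this]
                    have hcode : codeOf? c = none := by
                      have e1 : (c == 'C') = false := by simp [h1]
                      have e2 : (c == 'D') = false := by simp [h2]
                      have e3 : (c == 'F') = false := by simp [h3]
                      have e4 : (c == 'G') = false := by simp [h4]
                      have e5 : (c == 'A') = false := by simp [h5]
                      simp [codeOf?, noteCode, List.lookup, e1, e2, e3, e4, e5]
                    simp [encB, hcode]
        · -- d ≠ '#': every pass keeps c in front (the next char is never '#')
          obtain ⟨y1, t1, e1, hy1⟩ := rep2_head_ne 'C' '#' 'H' (by decide) d t hd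
          obtain ⟨y2, t2, e2, hy2⟩ := rep2_head_ne 'D' '#' 'I' (by decide) y1 t1 hy1
          obtain ⟨y3, t3, e3, hy3⟩ := rep2_head_ne 'F' '#' 'J' (by decide) y2 t2 hy2
          obtain ⟨y4, t4, e4, hy4⟩ := rep2_head_ne 'G' '#' 'K' (by decide) y3 t3 hy3
          rw [rep2_cons_of 'C' '#' 'H' c _ (Or.inr (by simpa using hd))]
          rw [rep2_cons_of 'D' '#' 'I' c _ (Or.inr (by rw [e1]; simpa using hy1))]
          rw [rep2_cons_of 'F' '#' 'J' c _ (Or.inr (by rw [e1, e2]; simpa using hy2))]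
          rw [rep2_cons_of 'G' '#' 'K' c _ (Or.inr (by rw [e1, e2, e3]; simpa using hy3))]
          rw [rep2_cons_of 'A' '#' 'L' c _ (Or.inr (by rw [e1, e2, e3, e4]; simpa using hy4))]
          have := ih (d :: t) htd; simp only [chainRep] at this; rw [this]
          have : ¬ ((codeOf? c).isSome ∧ d = '#') := by tauto
          simp [encB, this]
  exact H s.length s le_rfl

lemma change_toList (s : String) : (change s).toList = encB s.toList := by
  show (PySem.Str.replace (PySem.Str.replace (PySem.Str.replace (PySem.Str.replace (PySem.Str.replace s "C#" "H") "D#" "I") "F#" "J") "G#" "K") "A#" "L").toList = encB s.toList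
  simp only [PySem.Str.toList_replace]
  rw [show ("C#" : String).toList = ['C', '#'] from rfl,
      show ("D#" : String).toList = ['D', '#'] from rfl,
      show ("F#" : String).toList = ['F', '#'] from rfl,
      show ("G#" : String).toList = ['G', '#'] from rfl,
      show ("A#" : String).toList = ['A', '#'] from rfl,
      show ("H" : String).toList = ['H'] from rfl,
      show ("I" : String).toList = ['I'] from rfl,
      show ("J" : String).toList = ['J'] from rfl,
      show ("K" : String).toList = ['K'] from rfl,
      show ("L" : String).toList = ['L'] from rfl]
  rw [replace_eq_rep2, replace_eq_rep2, replace_eq_rep2, replace_eq_rep2, replace_eq_rep2]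
  exact chainRep_eq_encB s.toList

lemma take_eq_range_map (notes : List Char) (r : Nat) (hr : r ≤ notes.length) :
    notes.take r = (List.range r).map (fun k => notes.getD k ' ') := by
  apply List.ext_getElem
  · simp [hr]
  · intro k h1 h2
    simp only [List.getElem_take, List.getElem_map, List.getElem_range]
    rw [List.getD_eq_getElem]

lemma range_map_mod (notes : List Char) (r : Nat) (hn : 0 < notes.length) (hr : r ≤ notes.length) :
    (List.range r).map (fun k => notes.getD (k % notes.length) ' ')
      = (List.range r).map (fun k => notes.getD k ' ') := by
  apply List.map_congr_left
  intro k hk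
  simp only [List.mem_range] at hk
  rw [Nat.mod_eq_of_lt (by omega)]

lemma repTake (notes : List Char) (q r : Nat) (hn : 0 < notes.length) (hr : r ≤ notes.length) :
    (List.replicate q notes).flatten ++ notes.take r
      = (List.range (q * notes.length + r)).map (fun k => notes.getD (k % notes.length) ' ') := by
  induction q with
  | zero =>
    simp only [List.replicate, List.flatten_nil, List.nil_append, Nat.zero_mul, Nat.zero_add]
    rw [range_map_mod notes r hn hr, take_eq_range_map notes r hr]
  | succ q ih =>
    have hsplit : (q + 1) * notes.length + r = notes.length + (q * notes.length + r) := by ring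
    rw [hsplit, List.range_add, List.map_append]
    have h1 : (List.range notes.length).map ((fun k => notes.getD (k % notes.length) ' ') ∘ (fun x => notes.length + x))
        = (List.range notes.length).map (fun k => notes.getD (k % notes.length) ' ') := by
      apply List.map_congr_left; intro k hk
      simp [Nat.add_mod_left]
    have h2 : (List.range notes.length).map (fun k => notes.getD (k % notes.length) ' ') = notes := by
      rw [range_map_mod notes notes.length hn le_rfl, ← take_eq_range_map notes notes.length le_rfl, List.take_length]
    have h3 : (List.map (fun k => notes.getD (k % notes.length) ' ') (List.map (fun x => notes.length + x) (List.range (q * notes.length + r)))) = (List.range (q * notes.length + r)).map (fun k => notes.getD (k % notes.length) ' ') := by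
      rw [List.map_map]
      apply List.map_congr_left; intro k hk
      simp [Nat.add_mod_left]
    rw [h3, ← ih]
    have h4 : (List.range notes.length).map (fun k => notes.getD (k % notes.length) ' ') = notes := h2
    rw [h4]
    simp [List.replicate_succ]

lemma melody2_eq_playedB (notes : List Char) (time : Int) (hn : 0 < notes.length) (ht : 0 ≤ time) :
    PySem.List.pyRepeat notes (PySem.Int.floordiv time (notes.length : Int))
      ++ PySem.Chars.slice notes none (some (PySem.Int.mod time (notes.length : Int)))
      = playedB notes time := by
  obtain ⟨tn, rfl⟩ : ∃ tn : Nat, time = (tn : Int) := ⟨time.toNat, (Int.toNat_of_nonneg ht).symm⟩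
  rw [PySem.Int.floordiv_natCast, PySem.Int.mod_natCast]
  rw [PySem.Chars.slice_eq_listSlice, PySem.List.slice_to_natCast]
  unfold playedB
  rw [PySem.List.pyRange_zero_natCast]
  rw [PySem.List.pyRepeat]
  simp only [Int.toNat_natCast]
  have hrt := repTake notes (tn / notes.length) (tn % notes.length) hn (le_of_lt (Nat.mod_lt _ hn))
  rw [Nat.div_add_mod' tn notes.length] at hrt
  rw [hrt, List.map_map]
  apply List.map_congr_left
  intro k hk
  simp only [List.mem_range] at hk
  simp only [Function.comp, PySem.Int.mod_natCast, PySem.List.pyGet?_natCast]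
  have hkn : k % notes.length < notes.length := Nat.mod_lt _ hn
  rw [List.getElem?_eq_getElem hkn]
  rw [List.getD_eq_getElem _ _ hkn]
  rfl


lemma occursB_eq_isIn (needle hay : List Char) :
    occursB needle hay = PySem.Chars.isIn needle hay := by
  rw [Bool.eq_iff_iff]
  constructor
  · intro h
    rw [occursB, List.any_eq_true] at h
    obtain ⟨i, hmem, hbeq⟩ := h
    rw [PySem.List.mem_pyRange_one] at hmem
    obtain ⟨hi0, hilt⟩ := hmem
    obtain ⟨j, rfl⟩ : ∃ j : Nat, i = (j : Int) := ⟨i.toNat, (Int.toNat_of_nonneg hi0).symm⟩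
    rw [PySem.List.slice_natCast_add] at hbeq
    have heq : List.take needle.length (List.drop j hay) = needle := by
      exact eq_of_beq hbeq
    rw [← PySem.Chars.exists_prefix_drop_iff_isIn]
    exact ⟨j, List.prefix_iff_eq_take.mpr heq.symm⟩
  · intro h
    rw [← PySem.Chars.exists_prefix_drop_iff_isIn] at h
    obtain ⟨j, hpre⟩ := h
    have hj : needle <+: hay.drop (min j hay.length) := by
      by_cases hle : j ≤ hay.length
      · rwa [min_eq_left hle]
      · rw [min_eq_right (by omega)]
        rwa [List.drop_eq_nil_of_le (by omega)] at hpre ⊢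

    set j' := min j hay.length with hj'
    have hj'le : j' ≤ hay.length := min_le_right _ _
    have hlen : needle.length ≤ hay.length - j' := by
      have := hj.length_le
      simp at this
      omega
    rw [occursB, List.any_eq_true]
    refine ⟨(j' : Int), ?_, ?_⟩
    · rw [PySem.List.mem_pyRange_one]
      constructor
      · positivity
      · push_cast; omega
    · rw [PySem.List.slice_natCast_add]
      have : needle = List.take needle.length (List.drop j' hay) := List.prefix_iff_eq_take.mp hj
      rw [← this]
      exact beq_self_eq_true needle


-- ---- E4: running best accumulator equals candidates + max ----

def mstep (m p : Int × String) : Int × String := if m.1 < p.1 then p else m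

def runSel (cands : List (Int × String)) : String × Int :=
  let r := cands.foldl mstep (-1, "(None)"); (r.2, r.1)

lemma max?_cons (p : Int × String) (l : List (Int × String)) :
    PySem.List.max? (p :: l) (fun c => c.1) = some (l.foldl mstep p) := by
  induction l generalizing p with
  | nil => rfl
  | cons q l ih =>
    simp only [PySem.List.max?, List.foldl_cons] at ih ⊢
    split_ifs with h
    · rw [ih q, show mstep p q = q by simp [mstep, h]]
    · rw [ih p, show mstep p q = p by simp [mstep, h]]

lemma runSel_append (cands : List (Int × String)) (p : Int × String) :
    runSel (cands ++ [p]) = (if (runSel cands).2 < p.1 then (p.2, p.1) else runSel cands) := by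
  simp only [runSel, List.foldl_append, List.foldl_cons, List.foldl_nil, mstep]
  split <;> simp

lemma foldl_mstep_fst_mono (l : List (Int × String)) (a : Int × String) :
    a.1 ≤ (l.foldl mstep a).1 := by
  induction l generalizing a with
  | nil => simp
  | cons q l ih =>
    simp only [List.foldl_cons, mstep]
    split
    · exact le_trans (le_of_lt (by assumption)) (ih q)
    · exact ih a

lemma runSel_snd_ge (cands : List (Int × String)) : -1 ≤ (runSel cands).2 := by
  simpa [runSel] using foldl_mstep_fst_mono cands (-1, "(None)")

lemma runSel_result (cands : List (Int × String)) (hpos : ∀ p ∈ cands, 0 ≤ p.1) :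
    (runSel cands).1 = (match PySem.List.max? cands (fun c => c.1) with
                        | none => "(None)" | some c => c.2) := by
  cases cands with
  | nil => rfl
  | cons p l =>
    rw [max?_cons]
    have hp : 0 ≤ p.1 := hpos p (by simp)
    simp only [runSel, List.foldl_cons]
    have : mstep (-1, "(None)") p = p := by
      simp [mstep, show (-1:Int) < p.1 by omega]
    rw [this]


-- ---- per-element and main glue ----

lemma encB_ne_nil (c : Char) (l : List Char) : encB (c :: l) ≠ [] := by
  match l with
  | [] => simp [encB]
  | d :: t => simp only [encB]; split <;> simp

lemma toList_ne_nil {s : String} (h : s ≠ "") : s.toList ≠ [] := by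
  intro hnil
  exact h (String.toList_inj.mp (by simpa using hnil))

lemma encodeB_len_pos (mel : String) (h : mel ≠ "") : 0 < (encodeB mel).toList.length := by
  have h1 : (encodeB mel).toList = encB mel.toList := String.toList_ofList
  rw [h1]
  cases hm : mel.toList with
  | nil => exact absurd hm (toList_ne_nil h)
  | cons c l =>
    have := encB_ne_nil c l
    cases he : encB (c :: l) with
    | nil => exact absurd he this
    | cons a b => simp

lemma stepA_eq (m : String) (acc : String × Int) (info : String)
    (h4 : (pvParts info).length = 4)
    (hse : ((pvParts info).getD 0 "" == (pvParts info).getD 1 "") = false) :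
    stepA m acc info =
      (if PySem.Str.isIn m (repSliceA (change ((pvParts info).getD 3 ""))
            (pvTime ((pvParts info).getD 0 "") (pvEnd ((pvParts info).getD 1 ""))))
          && decide (acc.2 < pvTime ((pvParts info).getD 0 "") (pvEnd ((pvParts info).getD 1 "")))
       then ((pvParts info).getD 2 "", pvTime ((pvParts info).getD 0 "") (pvEnd ((pvParts info).getD 1 "")))
       else acc) := by
  simp only [stepA, if_pos h4, hse, Bool.false_eq_true, if_false]

lemma stepB_eq (target : String) (cands : List (Int × String)) (info : String)
    (h4 : (pvParts info).length = 4)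
    (hse : ((pvParts info).getD 0 "" == (pvParts info).getD 1 "") = false) :
    stepB target cands info =
      (if 0 ≤ pvTime ((pvParts info).getD 0 "") (pvEnd ((pvParts info).getD 1 ""))
          ∧ occursB target.toList (playedB (encodeB ((pvParts info).getD 3 "")).toList
              (pvTime ((pvParts info).getD 0 "") (pvEnd ((pvParts info).getD 1 ""))))
       then cands ++ [(pvTime ((pvParts info).getD 0 "") (pvEnd ((pvParts info).getD 1 "")), (pvParts info).getD 2 "")]
       else cands) := by
  simp only [stepB, if_pos h4, hse, Bool.false_eq_true, if_false]

lemma coreSel (accA : String × Int) (cands : List (Int × String)) (title : String) (T : Int)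
    (bI bO : Bool) (hEq : 0 ≤ T → bI = bO) (hinv : accA = runSel cands) :
    (if bI && decide (accA.2 < T) then (title, T) else accA)
      = runSel (if 0 ≤ T ∧ bO = true then cands ++ [(T, title)] else cands) := by
  have hge : -1 ≤ accA.2 := hinv ▸ runSel_snd_ge cands
  by_cases ht : 0 ≤ T
  · have hb := hEq ht
    subst hb
    split_ifs with h1 h2 h2
    · simp only [Bool.and_eq_true, decide_eq_true_eq] at h1
      rw [runSel_append, ← hinv, if_pos h1.2]
    · simp only [Bool.and_eq_true, decide_eq_true_eq] at h1
      exact absurd ⟨ht, h1.1⟩ h2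
    · simp only [Bool.and_eq_true, decide_eq_true_eq, not_and] at h1
      rw [runSel_append, ← hinv, if_neg (fun hlt => by simp [h2.2, hlt] at h1)]
    · exact hinv
  · split_ifs with h1 h2 h2
    · simp only [Bool.and_eq_true, decide_eq_true_eq] at h1
      omega
    · simp only [Bool.and_eq_true, decide_eq_true_eq] at h1
      omega
    · exact absurd h2.1 ht
    · exact hinv

lemma repSliceA_toList (mel : String) (T : Int) (hmel : mel ≠ "") (ht : 0 ≤ T) :
    (repSliceA (change mel) T).toList = playedB (encodeB mel).toList T := by
  have hnotes : (change mel).toList = (encodeB mel).toList := by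
    rw [change_toList mel]; exact String.toList_ofList.symm
  have hn : 0 < (encodeB mel).toList.length := encodeB_len_pos mel hmel
  unfold repSliceA
  rw [String.toList_ofList, PySem.Str.toList_slice]
  simp only [PySem.Str.len, hnotes]
  exact melody2_eq_playedB ((encodeB mel).toList) T hn ht

lemma isIn_eq_occurs (m mel : String) (T : Int) (hmel : mel ≠ "") (ht : 0 ≤ T) :
    PySem.Str.isIn (change m) (repSliceA (change mel) T)
      = occursB (encodeB m).toList (playedB (encodeB mel).toList T) := by
  rw [PySem.Str.isIn, repSliceA_toList mel T hmel ht, change_toList m, occursB_eq_isIn,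
      show ((encodeB m).toList) = encB m.toList from String.toList_ofList]

lemma stepAB (m info : String) (accA : String × Int) (cands : List (Int × String))
    (hpre : (pvParts info).length = 4 ∧
      ((pvParts info).getD 0 "" = (pvParts info).getD 1 "" ∨
        ((PySem.Int.ofStr? (PySem.Str.slice (pvEnd ((pvParts info).getD 1 "")) (some (-2)) none)).isSome ∧
         (PySem.Int.ofStr? (PySem.Str.slice (pvEnd ((pvParts info).getD 1 "")) none (some 2))).isSome ∧
         (PySem.Int.ofStr? (PySem.Str.slice ((pvParts info).getD 0 "") (some (-2)) none)).isSome ∧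
         (PySem.Int.ofStr? (PySem.Str.slice ((pvParts info).getD 0 "") none (some 2))).isSome ∧
         (pvParts info).getD 3 "" ≠ "")))
    (hinv : accA = runSel cands) :
    stepA (change m) accA info = runSel (stepB (encodeB m) cands info) := by
  obtain ⟨h4, hrest⟩ := hpre
  by_cases hse : (((pvParts info).getD 0 "" == (pvParts info).getD 1 "") = true)
  · simp only [stepA, stepB, if_pos h4, if_pos hse]; exact hinv
  · have hseF : ((pvParts info).getD 0 "" == (pvParts info).getD 1 "") = false := by
      simpa using hse
    have hmel : (pvParts info).getD 3 "" ≠ "" := by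
      rcases hrest with hl | hr
      · exact absurd (by simpa using hl) hse
      · exact hr.2.2.2.2
    rw [stepA_eq (change m) accA info h4 hseF, stepB_eq (encodeB m) cands info h4 hseF]
    exact coreSel accA cands ((pvParts info).getD 2 "")
      (pvTime ((pvParts info).getD 0 "") (pvEnd ((pvParts info).getD 1 "")))
      _ _ (fun ht => isIn_eq_occurs m ((pvParts info).getD 3 "") _ hmel ht) hinv

lemma fold_rel (m : String) (infos : List String) (hpre : Pre_solution m infos) :
    ∀ (cands : List (Int × String)),
      infos.foldl (stepA (change m)) (runSel cands) = runSel (infos.foldl (stepB (encodeB m)) cands) := by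
  induction infos with
  | nil => intro cands; rfl
  | cons info rest ih =>
    intro cands
    have hh := hpre info (by simp)
    have hrest : Pre_solution m rest := fun i hi => hpre i (by simp [hi])
    simp only [List.foldl_cons]
    rw [stepAB m info (runSel cands) cands hh rfl]
    exact ih hrest (stepB (encodeB m) cands info)

lemma stepB_pos (target : String) (cands : List (Int × String)) (info : String)
    (h : ∀ p ∈ cands, 0 ≤ p.1) : ∀ p ∈ stepB target cands info, 0 ≤ p.1 := by
  intro p hp
  simp only [stepB] at hp
  split at hp
  · split at hp
    · exact h p hp
    · split at hp
      · rename_i hcond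
        rcases List.mem_append.mp hp with hp | hp
        · exact h p hp
        · rw [List.mem_singleton] at hp; subst hp; exact hcond.1
      · exact h p hp
  · exact h p hp

lemma foldB_pos (target : String) (infos : List String) :
    ∀ cands, (∀ p ∈ cands, 0 ≤ p.1) → ∀ p ∈ infos.foldl (stepB target) cands, 0 ≤ p.1 := by
  induction infos with
  | nil => intro cands h; simpa using h
  | cons info rest ih =>
    intro cands h
    simp only [List.foldl_cons]
    exact ih _ (stepB_pos target cands info h)

-- ===== VERDICT (by name: the statement is the Claim_ definition above) =====
theorem solution_spec : Claim_equal_solution := by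
  intro m musicinfos _hdom hpre
  unfold Spec_solution solution solution_alt
  have h0 : (("(None)" : String), (-1 : Int)) = runSel [] := rfl
  rw [h0, fold_rel m musicinfos hpre []]
  exact runSel_result _ (foldB_pos (encodeB m) musicinfos [] (by simp))
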